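-- pv_equiv track=rewrite | github.com/LiaRenny/GitCodeRepo | HighestOrder_SingleCustomer.py | nth_highest_order_count
-- ===== SOURCE A (Python) =====
-- def nth_highest_order_count(orders, n):
--     # Count orders per customer
--     order_counts = {}
--     for customer in orders:
--         order_counts[customer] = order_counts.get(customer, 0) + 1
--
--     # Get unique counts, sort descending
--     unique_counts = sorted(set(order_counts.values()), reverse=True)
--
--     if n <= 0 or n > len(unique_counts):
--         return None  # n is out of range
--
--     return unique_counts[n - 1]
-- ===== SOURCE B (Python) =====
-- def nth_highest_order_count(orders, n):
--     # Different decomposition: instead of sorting the distinct counts descending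
--     # and indexing, select the n-th highest by repeated max-removal.
--     tallies = {}
--     for customer in orders:
--         tallies[customer] = tallies.get(customer, 0) + 1
--
--     remaining = set(tallies.values())
--     if n <= 0 or n > len(remaining):
--         return None
--
--     result = None
--     for _ in range(n):
--         result = max(remaining)
--         remaining.remove(result)
--     return result
-- ===== Notes on version B (the rewrite author's own statement) =====
-- stated objective: alternative
-- what changed: B replaces sorting the distinct per-customer counts descending and indexing position n-1 by a selection loop that n times takes and removes the maximum of the remaining distinct counts.
import Mathlib
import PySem

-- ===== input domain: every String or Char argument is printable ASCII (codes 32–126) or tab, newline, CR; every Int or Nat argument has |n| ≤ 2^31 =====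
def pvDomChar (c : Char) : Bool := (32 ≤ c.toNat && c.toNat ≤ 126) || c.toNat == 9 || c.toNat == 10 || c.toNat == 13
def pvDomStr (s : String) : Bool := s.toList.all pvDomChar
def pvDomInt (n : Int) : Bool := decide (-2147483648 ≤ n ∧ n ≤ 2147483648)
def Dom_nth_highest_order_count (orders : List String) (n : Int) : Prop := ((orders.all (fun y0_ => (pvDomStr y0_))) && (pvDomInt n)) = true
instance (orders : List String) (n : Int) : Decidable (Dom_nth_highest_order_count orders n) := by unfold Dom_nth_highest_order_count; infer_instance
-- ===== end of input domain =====

-- B selects the n-th highest distinct per-customer count by repeated max-removal instead of sorting descending and indexing (alternative decomposition, proved equal).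


-- ===== PORT A =====
def nth_highest_order_count (orders : List String) (n : Int) : Option Int :=
  let order_counts : PySem.Dict String Int :=
    orders.foldl (fun d customer =>
      PySem.Dict.insert d customer (PySem.Dict.getD d customer 0 + 1)) PySem.Dict.empty
  let unique_counts : List Int :=
    PySem.List.sorted (PySem.Set.ofList (PySem.Dict.values order_counts)) (fun x => x) true
  if n ≤ 0 ∨ n > (unique_counts.length : Int) then none
  else PySem.List.pyGet? unique_counts (n - 1)

-- ===== PORT B =====
-- the selection loop 'for _ in range(k): result = max(remaining); remaining.remove(result)';
-- 'remaining.remove(result)' is Set.discard since result ∈ remaining there; the max?-none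
-- branch is unreachable under the guard (Python's max would raise on an empty set).
def pvSelect : Nat → Option Int × PySem.Set Int → Option Int × PySem.Set Int
  | 0, st => st
  | k+1, (_, remaining) =>
    match PySem.List.max? remaining (fun x => x) with
    | some m => pvSelect k (some m, PySem.Set.discard remaining m)
    | none => pvSelect k (none, remaining)

def nth_highest_order_count_alt (orders : List String) (n : Int) : Option Int :=
  let tallies : PySem.Dict String Int :=
    orders.foldl (fun d customer =>
      PySem.Dict.insert d customer (PySem.Dict.getD d customer 0 + 1)) PySem.Dict.empty
  let remaining : PySem.Set Int := PySem.Set.ofList (PySem.Dict.values tallies)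
  if n ≤ 0 ∨ n > (remaining.length : Int) then none
  else (pvSelect n.toNat (none, remaining)).1

-- ===== PRECONDITION & SPEC =====
def Spec_nth_highest_order_count (orders : List String) (n : Int) (out : Option Int) : Prop := out = nth_highest_order_count_alt orders n
instance (orders : List String) (n : Int) (out : Option Int) : Decidable (Spec_nth_highest_order_count orders n out) := by unfold Spec_nth_highest_order_count; infer_instance

-- ===== CLAIM (what is proved, stated in full; the proofs are below) =====
def Claim_equal_nth_highest_order_count : Prop := ∀ (orders : List String) (n : Int), Dom_nth_highest_order_count orders n → Spec_nth_highest_order_count orders n (nth_highest_order_count orders n)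

-- ===== LEMMAS AND PROOFS =====

lemma max_of_sorted_rev_cons (xs : List Int) (m : Int) (t : List Int)
    (h : PySem.List.sorted xs (fun x => x) true = m :: t) :
    PySem.List.max? xs (fun x => x) = some m := by
  have hmem : m ∈ xs := by
    have := (PySem.List.sorted_perm xs (fun x => x) true).mem_iff (a := m)
    rw [h] at this
    exact this.mp (List.mem_cons_self)
  cases hmax : PySem.List.max? xs (fun x => x) with
  | none =>
    rw [PySem.List.max?_eq_none_iff] at hmax
    simp [hmax] at hmem
  | some m' =>
    have h1 := PySem.List.max?_isMax hmax m hmem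
    have h2 := PySem.List.key_head_sorted_rev_ge xs (fun x => x) h m' (PySem.List.max?_mem hmax)
    have hmm : m' = m := le_antisymm h2 h1
    rw [hmm]

lemma discard_eq_erase (xs : List Int) (m : Int) (hnd : xs.Nodup) :
    PySem.Set.discard xs m = xs.erase m := by
  rw [List.Nodup.erase_eq_filter hnd m]
  rfl

lemma tail_of_sorted_rev_cons (xs : List Int) (m : Int) (t : List Int)
    (hnd : xs.Nodup)
    (h : PySem.List.sorted xs (fun x => x) true = m :: t) :
    PySem.List.sorted (PySem.Set.discard xs m) (fun x => x) true = t := by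
  have hperm : (m :: t).Perm xs := by
    have := PySem.List.sorted_perm xs (fun x => x) true
    rwa [h] at this
  have hndc : (m :: t).Nodup := hperm.nodup_iff.mpr hnd
  apply PySem.List.sorted_rev_eq_of_perm_of_pairwise_gt
  · -- t.Perm (discard xs m)
    rw [discard_eq_erase xs m hnd]
    have := hperm.erase m
    rwa [List.erase_cons_head] at this
  · -- strictly decreasing
    have hpw : List.Pairwise (fun a b : Int => b ≤ a) (m :: t) := by
      have := PySem.List.sorted_pairwise_rev xs (fun x => x)
      rwa [h] at this
    have : List.Pairwise (fun a b : Int => b < a) (m :: t) := by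
      have := hpw.and hndc
      exact this.imp (fun {a b} hab => lt_of_le_of_ne hab.1 (Ne.symm hab.2))
    exact this.of_cons

lemma pvSelect_eq_sorted (k : Nat) :
    ∀ (xs : List Int) (c : Option Int), xs.Nodup → k + 1 ≤ xs.length →
    (pvSelect (k+1) (c, xs)).1 = (PySem.List.sorted xs (fun x => x) true)[k]? := by
  induction k with
  | zero =>
    intro xs c hnd hlen
    have hne : xs ≠ [] := by intro h; simp [h] at hlen
    obtain ⟨m, t, h⟩ : ∃ m t, PySem.List.sorted xs (fun x => x) true = m :: t := by
      cases hs : PySem.List.sorted xs (fun x => x) true with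
      | nil => exact absurd ((PySem.List.sorted_eq_nil_iff xs _ true).mp hs) hne
      | cons m t => exact ⟨m, t, rfl⟩
    have hmax := max_of_sorted_rev_cons xs m t h
    simp [pvSelect, hmax, h]
  | succ k ih =>
    intro xs c hnd hlen
    have hne : xs ≠ [] := by intro h; simp [h] at hlen
    obtain ⟨m, t, h⟩ : ∃ m t, PySem.List.sorted xs (fun x => x) true = m :: t := by
      cases hs : PySem.List.sorted xs (fun x => x) true with
      | nil => exact absurd ((PySem.List.sorted_eq_nil_iff xs _ true).mp hs) hne
      | cons m t => exact ⟨m, t, rfl⟩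
    have hmax := max_of_sorted_rev_cons xs m t h
    have htail := tail_of_sorted_rev_cons xs m t hnd h
    have hndE : (PySem.Set.discard xs m).Nodup := by
      rw [discard_eq_erase xs m hnd]; exact hnd.erase m
    have hlenE : k + 1 ≤ (PySem.Set.discard xs m).length := by
      rw [discard_eq_erase xs m hnd,
          List.length_erase_of_mem (PySem.List.max?_mem hmax)]
      omega
    show (pvSelect (k+1+1) (c, xs)).1 = _
    rw [show pvSelect (k+1+1) (c, xs)
          = pvSelect (k+1) (some m, PySem.Set.discard xs m) by
        simp [pvSelect, hmax]]
    rw [ih (PySem.Set.discard xs m) (some m) hndE hlenE, htail, h]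
    simp

lemma pvMain_eq (xs : List Int) (n : Int) (hnd : xs.Nodup) :
    (if n ≤ 0 ∨ ((xs.length : Int) < n) then none
      else PySem.List.pyGet? (PySem.List.sorted xs (fun x => x) true) (n - 1))
    = (if n ≤ 0 ∨ ((xs.length : Int) < n) then none
      else (pvSelect n.toNat (none, xs)).1) := by
  split_ifs with h
  · rfl
  · push_neg at h
    obtain ⟨hpos, hle⟩ := h
    have hk : n.toNat = (n - 1).toNat + 1 := by omega
    have hlen : (n - 1).toNat + 1 ≤ xs.length := by omega
    rw [hk, pvSelect_eq_sorted _ xs none hnd hlen]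
    have h2 : n - 1 = (((n - 1).toNat : Nat) : Int) := by omega
    rw [h2, PySem.List.pyGet?_natCast]
    simp

-- ===== VERDICT (by name: the statement is the Claim_ definition above) =====
theorem nth_highest_order_count_spec : Claim_equal_nth_highest_order_count := by
  intro orders n _
  unfold Spec_nth_highest_order_count nth_highest_order_count nth_highest_order_count_alt
  simp only [PySem.List.length_sorted]
  exact pvMain_eq _ n (PySem.Set.nodup_ofList _)
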